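-- pv_equiv track=rewrite | github.com/onsuk/Programmers | 2018 서머윈터/숫자 게임/solution.py | solution
-- ===== SOURCE A (Python) =====
-- def solution(A, B):
--     point = 0
--     A.sort()
--     B.sort()
--     for a in A:
--         for b in B:
--             if(a < b):
--                 B.remove(b)
--                 point += 1
--                 break
--     return point
-- ===== SOURCE B (Python) =====
-- def solution(A, B):
--     sa = sorted(A)
--     i = 0
--     point = 0
--     for b in sorted(B):
--         if i < len(sa) and sa[i] < b:
--             point += 1
--             i += 1
--     return point
-- ===== Notes on version B (the rewrite author's own statement) =====
-- stated objective: faster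
-- what changed: Replaces the nested scan-and-remove over B (quadratic) by a single two-pointer pass over the two sorted lists.
import Mathlib
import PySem

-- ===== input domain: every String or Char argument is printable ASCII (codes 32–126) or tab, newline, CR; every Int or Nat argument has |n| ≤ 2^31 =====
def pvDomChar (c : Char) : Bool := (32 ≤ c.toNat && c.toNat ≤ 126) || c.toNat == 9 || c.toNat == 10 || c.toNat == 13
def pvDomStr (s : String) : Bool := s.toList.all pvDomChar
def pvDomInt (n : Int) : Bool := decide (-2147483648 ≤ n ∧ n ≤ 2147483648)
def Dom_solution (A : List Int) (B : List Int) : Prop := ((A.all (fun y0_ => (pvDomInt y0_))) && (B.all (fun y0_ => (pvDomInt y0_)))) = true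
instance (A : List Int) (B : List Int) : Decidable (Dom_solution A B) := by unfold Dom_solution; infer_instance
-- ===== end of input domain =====

-- B replaces A's nested scan-and-remove over B by a single two-pointer pass over the sorted
-- lists; equivalence is about the RETURN value only (Python A sorts and shrinks its arguments
-- in place, B does not mutate them).

-- ===== PORT A =====
-- inner 'for b in B: if a < b: B.remove(b); break' — the matched b is the FIRST element
-- greater than a, and no earlier element can equal it, so remove-by-value deletes exactly
-- the scanned position; returns (new B, points gained ∈ {0,1}).
def solInner (a : Int) : List Int → List Int × Int
  | [] => ([], 0)
  | b :: bs => if a < b then (bs, 1)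
               else let r := solInner a bs; (b :: r.1, r.2)

def solution (A : List Int) (B : List Int) : Int :=
  let As := PySem.List.sorted A (fun x => x) false
  let Bs := PySem.List.sorted B (fun x => x) false
  (As.foldl (fun (st : List Int × Int) a =>
      let r := solInner a st.1; (r.1, st.2 + r.2)) (Bs, 0)).2

-- ===== PORT B =====
def solution_alt (A : List Int) (B : List Int) : Int :=
  let sa := PySem.List.sorted A (fun x => x) false
  let sb := PySem.List.sorted B (fun x => x) false
  (sb.foldl (fun (st : Nat × Int) b =>
      if h : st.1 < sa.length then
        if sa[st.1] < b then (st.1 + 1, st.2 + 1) else st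
      else st) (0, 0)).2

-- ===== PRECONDITION & SPEC =====
def Spec_solution (A : List Int) (B : List Int) (out : Int) : Prop := out = solution_alt A B
instance (A : List Int) (B : List Int) (out : Int) : Decidable (Spec_solution A B out) := by unfold Spec_solution; infer_instance

-- ===== CLAIM (what is proved, stated in full; the proofs are below) =====
def Claim_equal_solution : Prop := ∀ (A : List Int) (B : List Int), Dom_solution A B → Spec_solution A B (solution A B)

-- ===== LEMMAS AND PROOFS =====

-- proof-side two-pointer recursion both ports are reduced to
def tp : List Int → List Int → Int
  | [], _ => 0
  | _ :: _, [] => 0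
  | a :: as, b :: bs => if a < b then 1 + tp as bs else tp (a :: as) bs

theorem tp_nil_right : ∀ l, tp l [] = 0 := by
  intro l; cases l <;> simp [tp]

-- skipping one b that no remaining a can beat
theorem tp_skip (L : List Int) (b : Int) (bs : List Int)
    (h : ∀ x ∈ L, ¬ x < b) : tp L (b :: bs) = tp L bs := by
  cases L with
  | nil => cases bs <;> simp [tp]
  | cons a as =>
    have : ¬ a < b := h a (List.mem_cons_self ..)
    simp [tp, this]

theorem solInner_key (a : Int) (As' : List Int) :
    ∀ Bs : List Int, Bs.Pairwise (· ≤ ·) → (∀ x ∈ As', a ≤ x) →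
      ((solInner a Bs).2 : Int) + tp As' (solInner a Bs).1 = tp (a :: As') Bs := by
  intro Bs
  induction Bs with
  | nil => intro _ _; simp [solInner, tp, tp_nil_right]
  | cons b bs ih =>
    intro hs hA
    by_cases hb : a < b
    · simp [solInner, hb, tp]
    · have hsb : bs.Pairwise (· ≤ ·) := hs.of_cons
      have hskip : ∀ x ∈ As', ¬ x < b := by
        intro x hx
        have := hA x hx
        omega
      simp only [solInner, hb, if_false]
      rw [tp_skip As' b (solInner a bs).1 hskip, ih hsb hA]
      simp [tp, hb]

theorem solInner_sublist (a : Int) : ∀ Bs : List Int, (solInner a Bs).1.Sublist Bs := by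
  intro Bs
  induction Bs with
  | nil => simp [solInner]
  | cons b bs ih =>
    by_cases hb : a < b
    · simp [solInner, hb]
    · simpa [solInner, hb] using ih.cons₂ b

theorem foldA_tp :
    ∀ (As : List Int), As.Pairwise (· ≤ ·) → ∀ (Bs : List Int), Bs.Pairwise (· ≤ ·) → ∀ (p : Int),
      (As.foldl (fun (st : List Int × Int) a =>
          let r := solInner a st.1; (r.1, st.2 + r.2)) (Bs, p)).2 = p + tp As Bs := by
  intro As
  induction As with
  | nil => intro _ Bs _ p; cases Bs <;> simp [tp]
  | cons a As' ih =>
    intro hA Bs hB p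
    have hA' : As'.Pairwise (· ≤ ·) := hA.of_cons
    have haLe : ∀ x ∈ As', a ≤ x := fun x hx => (List.pairwise_cons.mp hA).1 x hx
    have hB' : (solInner a Bs).1.Pairwise (· ≤ ·) := hB.sublist (solInner_sublist a Bs)
    simp only [List.foldl_cons]
    rw [ih hA' _ hB' _]
    rw [← solInner_key a As' Bs hB haLe]
    ring

theorem foldB_tp (sa : List Int) :
    ∀ (sb : List Int) (i : Nat) (p : Int),
      ((sb.foldl (fun (st : Nat × Int) b =>
          if h : st.1 < sa.length then
            if sa[st.1] < b then (st.1 + 1, st.2 + 1) else st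
          else st) (i, p)).2) = p + tp (sa.drop i) sb := by
  intro sb
  induction sb with
  | nil => intro i p; simp [tp_nil_right]
  | cons b bs ih =>
    intro i p
    by_cases hi : i < sa.length
    · have hdrop : sa.drop i = sa[i] :: sa.drop (i + 1) := List.drop_eq_getElem_cons hi
      by_cases hlt : sa[i] < b
      · simp only [List.foldl_cons, hi, hlt, dif_pos, if_pos]
        rw [ih (i + 1) (p + 1), hdrop]
        simp [tp, hlt]
        ring
      · simp only [List.foldl_cons, hi, dif_pos, if_neg hlt]
        rw [ih i p, hdrop]
        simp [tp, hlt, ← hdrop]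
    · have hdrop : sa.drop i = [] := List.drop_eq_nil_of_le (by omega)
      simp only [List.foldl_cons, dif_neg hi]
      rw [ih i p, hdrop]
      simp [tp]

-- ===== VERDICT (by name: the statement is the Claim_ definition above) =====
theorem solution_spec : Claim_equal_solution := by
  intro A B _
  unfold Spec_solution solution solution_alt
  have hA := PySem.List.sorted_pairwise (xs := A) (key := fun x : Int => x)
  have hB := PySem.List.sorted_pairwise (xs := B) (key := fun x : Int => x)
  rw [foldA_tp _ hA _ hB 0, foldB_tp _ _ 0 0]
  simp
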